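-- pv_equiv track=rewrite | github.com/MuddasirAshrafi/HDRM | src/function.py | route_affected_by_closure
-- ===== SOURCE A (Python) =====
-- def route_affected_by_closure(route, closure_nodes):
--     if route is None:
--         return 0
--     for closure in closure_nodes:
--         node_id = closure.get("node_id")
--         if node_id in route:
--             return 1
--     return 0
-- ===== SOURCE B (Python) =====
-- def route_affected_by_closure(route, closure_nodes):
--     if route is None:
--         return 0
--     closed = {c.get("node_id") for c in closure_nodes}
--     for node in route:
--         if node in closed:
--             return 1
--     return 0
-- ===== Notes on version B (the rewrite author's own statement) =====
-- stated objective: alternative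
-- what changed: B builds a set of all closure node ids once and then scans the route for membership, instead of scanning the closure list and testing each id against the route; this inverts which collection drives the loop and removes the repeated 'in route' scan.
import Mathlib
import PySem

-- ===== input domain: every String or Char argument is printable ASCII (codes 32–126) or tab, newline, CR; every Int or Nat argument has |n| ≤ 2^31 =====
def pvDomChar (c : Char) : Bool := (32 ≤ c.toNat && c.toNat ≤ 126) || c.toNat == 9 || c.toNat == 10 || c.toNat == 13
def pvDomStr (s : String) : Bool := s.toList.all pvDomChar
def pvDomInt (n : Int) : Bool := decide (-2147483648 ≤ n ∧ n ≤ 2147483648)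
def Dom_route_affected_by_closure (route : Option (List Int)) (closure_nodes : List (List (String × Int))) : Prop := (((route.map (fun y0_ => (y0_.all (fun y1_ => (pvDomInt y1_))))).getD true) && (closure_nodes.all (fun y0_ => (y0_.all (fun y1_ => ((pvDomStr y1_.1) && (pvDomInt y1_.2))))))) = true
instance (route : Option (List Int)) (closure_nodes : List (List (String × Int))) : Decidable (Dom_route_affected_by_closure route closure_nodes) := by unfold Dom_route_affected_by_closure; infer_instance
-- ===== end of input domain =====

-- B builds a set of all closure node ids once and scans the route for membership,
-- inverting which collection drives the loop (objective: alternative decomposition).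

-- ===== PORT A =====
-- the 'for closure in closure_nodes' loop of A; a missing "node_id" key gives
-- node_id = None, and 'None in route' is False for an int route, so the loop continues
def routeAffectedLoopA (route : List Int) : List (List (String × Int)) → Int
  | [] => 0
  | closure :: rest =>
    match PySem.Dict.get? (PySem.Dict.mk closure) "node_id" with
    | some node_id => if node_id ∈ route then 1 else routeAffectedLoopA route rest
    | none => routeAffectedLoopA route rest

def route_affected_by_closure (route : Option (List Int)) (closure_nodes : List (List (String × Int))) : Int :=
  match route with
  | none => 0
  | some r => routeAffectedLoopA r closure_nodes

-- ===== PORT B =====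
-- the 'for node in route' loop of B, scanning route against the prebuilt set
def routeAffectedLoopB (closed : PySem.Set Int) : List Int → Int
  | [] => 0
  | node :: rest => if node ∈ closed then 1 else routeAffectedLoopB closed rest

def route_affected_by_closure_alt (route : Option (List Int)) (closure_nodes : List (List (String × Int))) : Int :=
  match route with
  | none => 0
  | some r =>
    -- {c.get("node_id") for c in closure_nodes}: the missing-key None element can
    -- never equal an int route element, so only present ids are collected
    let closed : PySem.Set Int :=
      PySem.Set.ofList (closure_nodes.filterMap (fun c => PySem.Dict.get? (PySem.Dict.mk c) "node_id"))
    routeAffectedLoopB closed r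

-- ===== PRECONDITION & SPEC =====
def Spec_route_affected_by_closure (route : Option (List Int)) (closure_nodes : List (List (String × Int))) (out : Int) : Prop := out = route_affected_by_closure_alt route closure_nodes
instance (route : Option (List Int)) (closure_nodes : List (List (String × Int))) (out : Int) : Decidable (Spec_route_affected_by_closure route closure_nodes out) := by unfold Spec_route_affected_by_closure; infer_instance

-- ===== CLAIM (what is proved, stated in full; the proofs are below) =====
def Claim_equal_route_affected_by_closure : Prop := ∀ (route : Option (List Int)) (closure_nodes : List (List (String × Int))), Dom_route_affected_by_closure route closure_nodes → Spec_route_affected_by_closure route closure_nodes (route_affected_by_closure route closure_nodes)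

-- ===== LEMMAS AND PROOFS =====

theorem loopA_eq_ite (route : List Int) (cs : List (List (String × Int))) :
    routeAffectedLoopA route cs =
      if ∃ v ∈ cs.filterMap (fun c => PySem.Dict.get? (PySem.Dict.mk c) "node_id"), v ∈ route then 1 else 0 := by
  induction cs with
  | nil => simp [routeAffectedLoopA]
  | cons c rest ih =>
    rw [List.filterMap_cons]
    cases h : PySem.Dict.get? (PySem.Dict.mk c) "node_id" with
    | none => simp [routeAffectedLoopA, h, ih]
    | some v =>
      by_cases hv : v ∈ route
      · simp [routeAffectedLoopA, h, hv]
      · rw [show routeAffectedLoopA route (c :: rest) = routeAffectedLoopA route rest by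
              simp [routeAffectedLoopA, h, hv], ih]
        congr 1
        rw [eq_iff_iff]
        constructor
        · rintro ⟨w, hw, hr⟩; exact ⟨w, List.mem_cons_of_mem _ hw, hr⟩
        · rintro ⟨w, hw, hr⟩
          rcases List.mem_cons.mp hw with rfl | hw'
          · exact absurd hr hv
          · exact ⟨w, hw', hr⟩

theorem loopB_eq_ite (closed : PySem.Set Int) (r : List Int) :
    routeAffectedLoopB closed r = if ∃ x ∈ r, x ∈ closed then 1 else 0 := by
  induction r with
  | nil => simp [routeAffectedLoopB]
  | cons x rest ih =>
    by_cases hx : x ∈ closed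
    · simp [routeAffectedLoopB, hx]
    · simp [routeAffectedLoopB, hx, ih]

-- ===== VERDICT (by name: the statement is the Claim_ definition above) =====
theorem route_affected_by_closure_spec : Claim_equal_route_affected_by_closure := by
  intro route closure_nodes _
  unfold Spec_route_affected_by_closure
  cases route with
  | none => rfl
  | some r =>
    simp only [route_affected_by_closure, route_affected_by_closure_alt,
      loopA_eq_ite, loopB_eq_ite, PySem.Set.mem_ofList]
    congr 1
    simp only [eq_iff_iff]
    constructor
    · rintro ⟨v, hv, hr⟩; exact ⟨v, hr, hv⟩
    · rintro ⟨x, hx, hc⟩; exact ⟨x, hc, hx⟩
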